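-- pv_equiv track=rewrite | github.com/clicksports/n8n-automation-project | cleanup_duplicate_workflows.py | identify_duplicates
-- ===== SOURCE A (Python) =====
-- def identify_duplicates(workflows):
--     """Identify duplicate workflows based on base names"""
--     name_groups = {}
--
--     for workflow in workflows:
--         # Remove "(Fixed)" suffix to group similar workflows
--         base_name = workflow['name'].replace(' (Fixed)', '').strip()
--         if base_name not in name_groups:
--             name_groups[base_name] = []
--         name_groups[base_name].append(workflow)
--
--     duplicates = {}
--     for base_name, group in name_groups.items():
--         if len(group) > 1:
--             duplicates[base_name] = sorted(group, key=lambda x: x.get('updatedAt', ''), reverse=True)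
--
--     return duplicates
-- ===== SOURCE B (Python) =====
-- def identify_duplicates(workflows):
--     """Identify duplicate workflows based on base names"""
--     keys = [w['name'].replace(' (Fixed)', '').strip() for w in workflows]
--     duplicates = {}
--     for name in dict.fromkeys(keys):
--         group = [w for w, k in zip(workflows, keys) if k == name]
--         if len(group) > 1:
--             duplicates[name] = sorted(group, key=lambda x: x.get('updatedAt', ''), reverse=True)
--     return duplicates
-- ===== Notes on version B (the rewrite author's own statement) =====
-- stated objective: alternative
-- what changed: B replaces A's incrementally-built hash map of groups by a two-phase plan: precompute each workflow's base name once, deduplicate the base names in first-occurrence order (dict.fromkeys), and materialise each group by filtering the zipped (workflow, key) list, keeping only groups of size > 1 sorted by updatedAt descending.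
import Mathlib
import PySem

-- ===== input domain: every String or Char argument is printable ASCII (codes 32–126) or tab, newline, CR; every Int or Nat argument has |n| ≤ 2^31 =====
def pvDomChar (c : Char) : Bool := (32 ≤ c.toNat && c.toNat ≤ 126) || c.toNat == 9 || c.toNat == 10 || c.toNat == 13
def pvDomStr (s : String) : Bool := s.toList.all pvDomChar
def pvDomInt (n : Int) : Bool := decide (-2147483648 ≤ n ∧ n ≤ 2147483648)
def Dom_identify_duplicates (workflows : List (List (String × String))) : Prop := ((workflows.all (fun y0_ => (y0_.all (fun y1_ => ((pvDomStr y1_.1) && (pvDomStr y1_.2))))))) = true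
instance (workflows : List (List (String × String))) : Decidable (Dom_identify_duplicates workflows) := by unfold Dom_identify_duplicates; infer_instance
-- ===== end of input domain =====

-- B groups by deduplicated base names + per-name filtering instead of A's incrementally built hash map of groups; alternative decomposition, same results.


-- ===== PORT A =====
-- workflow['name'] (first match in the association list; total form, used only under Pre_ which guarantees the key is present)
def pvNameOf (w : List (String × String)) : String :=
  (((w.find? (fun p => p.1 == "name")).map (fun p => p.2)).getD "")

-- base_name = workflow['name'].replace(' (Fixed)', '').strip()
def pvBase (w : List (String × String)) : String :=
  PySem.Str.strip (PySem.Str.replace (pvNameOf w) " (Fixed)" "")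

-- x.get('updatedAt', '')
def pvUpd (w : List (String × String)) : String :=
  (((w.find? (fun p => p.1 == "updatedAt")).map (fun p => p.2)).getD "")

def identify_duplicates (workflows : List (List (String × String))) : List (String × List (List (String × String))) :=
  -- first loop: build name_groups
  let name_groups : PySem.Dict String (List (List (String × String))) :=
    workflows.foldl (fun d w =>
      let base_name := pvBase w
      let d := if d.contains base_name then d else d.insert base_name []
      d.insert base_name (d.getD base_name [] ++ [w])) PySem.Dict.empty
  -- second loop: keep groups of size > 1, sorted by updatedAt descending
  let duplicates : PySem.Dict String (List (List (String × String))) :=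
    name_groups.items.foldl (fun d p =>
      if 1 < p.2.length then d.insert p.1 (PySem.List.sorted p.2 pvUpd true) else d) PySem.Dict.empty
  duplicates.items

-- ===== PORT B =====
def identify_duplicates_alt (workflows : List (List (String × String))) : List (String × List (List (String × String))) :=
  let keys := workflows.map pvBase
  (PySem.List.dedup keys).foldl (fun res name =>
    let group := (workflows.zip keys).filterMap (fun wk => if wk.2 == name then some wk.1 else none)
    if 1 < group.length then res ++ [(name, PySem.List.sorted group pvUpd true)] else res) []

-- ===== PRECONDITION & SPEC =====
-- Pre_ excludes workflows without a 'name' key, on which A raises KeyError (B raises too).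
def Pre_identify_duplicates (workflows : List (List (String × String))) : Prop :=
  (workflows.all (fun w => w.any (fun p => p.1 == "name"))) = true
instance (workflows : List (List (String × String))) : Decidable (Pre_identify_duplicates workflows) := by unfold Pre_identify_duplicates; infer_instance
def pvWitness_identify_duplicates : (List (List (String × String))) :=
  [[("name", "A (Fixed)"), ("updatedAt", "2021")], [("name", "A"), ("updatedAt", "2020")], [("name", "B")]]

def Spec_identify_duplicates (workflows : List (List (String × String))) (out : List (String × List (List (String × String)))) : Prop := out = identify_duplicates_alt workflows
instance (workflows : List (List (String × String))) (out : List (String × List (List (String × String)))) : Decidable (Spec_identify_duplicates workflows out) := by unfold Spec_identify_duplicates; infer_instance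

-- ===== CLAIM (what is proved, stated in full; the proofs are below) =====
def Claim_equal_identify_duplicates : Prop := ∀ (workflows : List (List (String × String))), Dom_identify_duplicates workflows → Pre_identify_duplicates workflows → Spec_identify_duplicates workflows (identify_duplicates workflows)

-- ===== LEMMAS AND PROOFS =====

lemma step_eq_modify (d : PySem.Dict String (List (List (String × String)))) (w : List (String × String)) :
    (let b := pvBase w
     let d' := if d.contains b then d else d.insert b []
     d'.insert b (d'.getD b [] ++ [w])) = d.modify (pvBase w) [] (· ++ [w]) := by
  by_cases h : d.contains (pvBase w)
  · simp [h, PySem.Dict.modify]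
  · simp [h, PySem.Dict.modify, PySem.Dict.getD_insert_self, PySem.Dict.insert_insert_self,
      PySem.Dict.getD_of_not_contains d _ (by simpa using h)]

lemma group_eq_filter (workflows : List (List (String × String))) (name : String) :
    (workflows.zip (workflows.map pvBase)).filterMap
        (fun wk => if wk.2 == name then some wk.1 else none)
      = workflows.filter (fun w => pvBase w == name) := by
  induction workflows with
  | nil => rfl
  | cons w t ih =>
    simp only [List.map_cons, List.zip_cons_cons, List.filterMap_cons, List.filter_cons, ih]
    by_cases h : pvBase w = name
    · simp [h]
    · simp [h]


-- ===== VERDICT (by name: the statement is the Claim_ definition above) =====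
theorem identify_duplicates_spec : Claim_equal_identify_duplicates := by
  intro workflows _ _
  unfold Spec_identify_duplicates
  have hstep : workflows.foldl
      (fun d w =>
        let base_name := pvBase w
        let d := if d.contains base_name then d else d.insert base_name []
        d.insert base_name (d.getD base_name [] ++ [w])) PySem.Dict.empty
    = workflows.foldl (fun d w => d.modify (pvBase w) [] (· ++ [w])) PySem.Dict.empty :=
    PySem.List.foldl_congr_mem _ _ _ _ (fun acc x _ => step_eq_modify acc x)
  set D := workflows.foldl (fun d w => d.modify (pvBase w) [] (· ++ [w])) PySem.Dict.empty with hD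
  have hkeys : D.keys = PySem.List.dedup (workflows.map pvBase) := by
    rw [PySem.List.dedup_eq_ofList, ← PySem.Set.update_nil_left]
    exact PySem.Dict.keys_foldl_modify_key workflows pvBase [] (fun _ w => (· ++ [w])) PySem.Dict.empty
  have hnodup : D.keys.Nodup :=
    PySem.Dict.nodup_keys_foldl_modify_key workflows pvBase [] (fun _ w => (· ++ [w])) PySem.Dict.empty (by simp)
  have hget : ∀ b, D.getD b [] = workflows.filter (fun w => pvBase w == b) := by
    intro b
    have h1 : D = (workflows.map (fun w => (pvBase w, w))).foldl
        (fun d p => d.modify p.1 [] (· ++ [p.2])) PySem.Dict.empty := by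
      rw [hD, List.foldl_map]
    rw [h1, PySem.Dict.getD_foldl_modify_append, List.filter_map]
    simp [Function.comp_def]
  have hitems : D.items = (PySem.List.dedup (workflows.map pvBase)).map
      (fun b => (b, workflows.filter (fun w => pvBase w == b))) := by
    rw [PySem.Dict.items_eq_map_keys D hnodup [], hkeys]
    simp only [hget]
  unfold identify_duplicates identify_duplicates_alt
  simp only [hstep, hitems, group_eq_filter]
  have hff := List.foldl_filter
      (p := fun p : String × List (List (String × String)) => decide (1 < p.2.length))
      (f := fun d p => d.insert p.1 (PySem.List.sorted p.2 pvUpd true))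
      (l := (PySem.List.dedup (List.map pvBase workflows)).map
        (fun b => (b, workflows.filter (fun w => pvBase w == b))))
      (init := PySem.Dict.empty)
  simp only [decide_eq_true_eq] at hff
  rw [← hff]
  have hfresh : ∀ a ∈ (((PySem.List.dedup (List.map pvBase workflows)).map
        (fun b => (b, workflows.filter (fun w => pvBase w == b)))).filter
          (fun p => decide (1 < p.2.length))),
      (PySem.Dict.empty (κ := String) (ν := List (List (String × String)))).contains a.1 = false := by
    intro a _; simp [PySem.Dict.contains_empty]
  have hnd : ((((PySem.List.dedup (List.map pvBase workflows)).map
        (fun b => (b, workflows.filter (fun w => pvBase w == b)))).filter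
          (fun p => decide (1 < p.2.length))).map Prod.fst).Nodup := by
    apply List.Nodup.sublist (List.Sublist.map Prod.fst (List.filter_sublist
      (l := (PySem.List.dedup (List.map pvBase workflows)).map
        (fun b => (b, workflows.filter (fun w => pvBase w == b))))))
    simp only [List.map_map]
    have : ((fun p : String × List (List (String × String)) => p.1) ∘
        (fun b => (b, workflows.filter (fun w => pvBase w == b)))) = id := rfl
    rw [this, List.map_id]
    exact PySem.List.nodup_dedup _
  rw [PySem.Dict.items_foldl_insert_fresh _ Prod.fst (fun p => PySem.List.sorted p.2 pvUpd true)
        PySem.Dict.empty hfresh hnd]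
  have haif := PySem.List.foldl_append_if
      (p := fun name => decide (1 < (workflows.filter (fun w => pvBase w == name)).length))
      (f := fun name => (name, PySem.List.sorted (workflows.filter (fun w => pvBase w == name)) pvUpd true))
      (l := PySem.List.dedup (List.map pvBase workflows)) (acc := [])
  simp only [decide_eq_true_eq] at haif
  rw [haif, List.filter_map]
  simp [Function.comp_def, List.map_map]
  rfl
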